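-- pv_equiv track=rewrite | github.com/mwooll/EhrhartQuasiPolynomial | ehrhart_polynomial/ehrhart_polynomial.py | _drop_constant_dimensions
-- ===== SOURCE A (Python) =====
-- def _drop_constant_dimensions(vertices, dimension):
--     r"""
--     Drop all dimensions <= dimension of 'vertices' where every vertex has the same value.
--
--     Return cleaned vertices, minimum and maximum over all vertices and dimension,
--     and the new dimension of the vertices.
--
--     TESTS::
--
--         sage: from ehrhart_polynomial.ehrhart_polynomial import _drop_constant_dimensions
--         sage: _drop_constant_dimensions([[0, 1, 2, 5], [0, 1, 4, 5]], 4)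
--         ([[2], [4]], [2], [4], 1)
--         sage: _drop_constant_dimensions([[0, -1, 0], [0, 1, 3], [0, 2, 2]], 3)
--         ([[-1, 0], [1, 3], [2, 2]], [-1, 0], [2, 3], 2)
--
--     """
--     columns = [[vertex[d] for vertex in vertices]
--                for d in range(dimension)]
--     mins = [min(col) for col in columns]
--     maxs = [max(col) for col in columns]
--
--     not_equal = [mins[d] != maxs[d] for d in range(dimension)]
--
--     vertices = _drop_dimensions(vertices, not_equal)
--     mins, maxs = _drop_dimensions([mins, maxs], not_equal)
--     new_dimension = sum(not_equal)
--     return vertices, mins, maxs, new_dimension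
--
-- def _drop_dimensions(to_reduce, keep_filter):
--     r"""
--     Return 'to_reduce' where the dimensions are filtered according to 'keep_filter'
--
--     TESTS::
--
--         sage: from ehrhart_polynomial.ehrhart_polynomial import _drop_dimensions
--         sage: _drop_dimensions([[0, 1, 2], [3, 4, 5]], [True, False, True])
--         [[0, 2], [3, 5]]
--         sage: _drop_dimensions([[0, 1, 2], [3, 4, 5]], [1, 1])
--         [[0, 1], [3, 4]]
--     """
--     return [[val for val, keep in zip(vertex, keep_filter) if keep]
--             for vertex in to_reduce]
-- ===== SOURCE B (Python) =====
-- def _drop_constant_dimensions(vertices, dimension):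
--     mins = []
--     for d in range(dimension):
--         mins.append(vertices[0][d])
--     maxs = mins
--     for v in vertices[1:]:
--         mins = [v[d] if v[d] < m else m for d, m in enumerate(mins)]
--         maxs = [v[d] if v[d] > m else m for d, m in enumerate(maxs)]
--     keep = [d for d in range(dimension) if mins[d] != maxs[d]]
--     return ([[v[d] for d in keep] for v in vertices],
--             [mins[d] for d in keep],
--             [maxs[d] for d in keep],
--             len(keep))
-- ===== Notes on version B (the rewrite author's own statement) =====
-- stated objective: alternative
-- what changed: B replaces A's column-transpose plus per-column min()/max() passes by a single row-major pass carrying running elementwise minima/maxima, and builds the outputs by indexing with a precomputed list of kept column indices instead of zip-filtering every row against a boolean mask.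
import Mathlib
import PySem

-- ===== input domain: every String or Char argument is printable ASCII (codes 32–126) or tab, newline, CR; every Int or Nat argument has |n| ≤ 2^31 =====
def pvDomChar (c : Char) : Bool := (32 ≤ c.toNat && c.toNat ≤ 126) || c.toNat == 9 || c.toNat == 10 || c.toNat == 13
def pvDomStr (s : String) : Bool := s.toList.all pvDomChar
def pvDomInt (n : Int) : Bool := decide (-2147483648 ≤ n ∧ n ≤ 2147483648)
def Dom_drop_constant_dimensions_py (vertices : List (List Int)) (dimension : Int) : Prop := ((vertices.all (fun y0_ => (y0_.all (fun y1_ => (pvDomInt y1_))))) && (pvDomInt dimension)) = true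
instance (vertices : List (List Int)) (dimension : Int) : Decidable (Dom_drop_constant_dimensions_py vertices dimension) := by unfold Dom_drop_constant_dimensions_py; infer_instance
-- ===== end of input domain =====

-- B replaces A's column-transpose + per-column min()/max() passes by a single row-major
-- pass keeping running elementwise minima/maxima, then index-based selection of the kept
-- columns (objective: alternative decomposition, same asymptotic cost).


-- ===== PORT A =====
def pv_dropDims (to_reduce : List (List Int)) (keep_filter : List Bool) : List (List Int) :=
  to_reduce.map (fun vertex => ((vertex.zip keep_filter).filter (fun p => p.2)).map (fun p => p.1))

def drop_constant_dimensions_py (vertices : List (List Int)) (dimension : Int) : List (List Int) × List Int × List Int × Int :=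
  let columns := (PySem.List.pyRange 0 dimension 1).map (fun d => vertices.map (fun vertex => PySem.List.pyGetD vertex d 0))
  let mins := columns.map (fun col => (PySem.List.min? col (fun y => y)).getD 0)
  let maxs := columns.map (fun col => (PySem.List.max? col (fun y => y)).getD 0)
  let not_equal := (PySem.List.pyRange 0 dimension 1).map (fun d => decide (PySem.List.pyGetD mins d 0 ≠ PySem.List.pyGetD maxs d 0))
  let vertices' := pv_dropDims vertices not_equal
  let mm := pv_dropDims [mins, maxs] not_equal
  (vertices', mm.getD 0 [], mm.getD 1 [], (not_equal.map (fun b => if b then (1 : Int) else 0)).sum)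

-- ===== PORT B =====
def drop_constant_dimensions_py_alt (vertices : List (List Int)) (dimension : Int) : List (List Int) × List Int × List Int × Int :=
  let mins0 := (PySem.List.pyRange 0 dimension 1).foldl
      (fun acc d => acc ++ [PySem.List.pyGetD (vertices.getD 0 []) d 0]) []
  let mm := (PySem.List.slice vertices (some 1) none).foldl
      (fun (p : List Int × List Int) v =>
        ((PySem.List.enumerate p.1).map (fun dm =>
            if PySem.List.pyGetD v dm.1 0 < dm.2 then PySem.List.pyGetD v dm.1 0 else dm.2),
         (PySem.List.enumerate p.2).map (fun dm =>
            if dm.2 < PySem.List.pyGetD v dm.1 0 then PySem.List.pyGetD v dm.1 0 else dm.2)))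
      (mins0, mins0)
  let keep := (PySem.List.pyRange 0 dimension 1).filter
      (fun d => decide (PySem.List.pyGetD mm.1 d 0 ≠ PySem.List.pyGetD mm.2 d 0))
  (vertices.map (fun v => keep.map (fun d => PySem.List.pyGetD v d 0)),
   keep.map (fun d => PySem.List.pyGetD mm.1 d 0),
   keep.map (fun d => PySem.List.pyGetD mm.2 d 0),
   (keep.length : Int))

-- ===== PRECONDITION & SPEC =====
-- Pre_ excludes exactly the inputs where A raises: empty vertices with dimension > 0
-- (ValueError from min of an empty column) and vertices shorter than dimension (IndexError);
-- B raises there as well.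
def Pre_drop_constant_dimensions_py (vertices : List (List Int)) (dimension : Int) : Prop :=
  0 < dimension → (vertices ≠ [] ∧ ∀ v ∈ vertices, dimension ≤ (v.length : Int))
instance (vertices : List (List Int)) (dimension : Int) : Decidable (Pre_drop_constant_dimensions_py vertices dimension) := by unfold Pre_drop_constant_dimensions_py; infer_instance

def pvWitness_drop_constant_dimensions_py : List (List Int) × Int := ([[0, 1, 2], [0, 3, 2]], 3)

def Spec_drop_constant_dimensions_py (vertices : List (List Int)) (dimension : Int) (out : List (List Int) × List Int × List Int × Int) : Prop := out = drop_constant_dimensions_py_alt vertices dimension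
instance (vertices : List (List Int)) (dimension : Int) (out : List (List Int) × List Int × List Int × Int) : Decidable (Spec_drop_constant_dimensions_py vertices dimension out) := by unfold Spec_drop_constant_dimensions_py; infer_instance

-- ===== CLAIM (what is proved, stated in full; the proofs are below) =====
def Claim_equal_drop_constant_dimensions_py : Prop := ∀ (vertices : List (List Int)) (dimension : Int), Dom_drop_constant_dimensions_py vertices dimension → Pre_drop_constant_dimensions_py vertices dimension → Spec_drop_constant_dimensions_py vertices dimension (drop_constant_dimensions_py vertices dimension)

-- ===== LEMMAS AND PROOFS =====

-- zip-filter by a boolean mask equals index selection by the mask's true indices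
lemma zipFilter_eq_indexSel (ne : List Bool) : ∀ (v : List Int), ne.length ≤ v.length →
    (((v.zip ne).filter (fun p => p.2)).map (fun p => p.1)
      = ((List.range ne.length).filter (fun j => ne.getD j false)).map (fun j => v.getD j 0)) := by
  induction ne with
  | nil => intro v _; simp
  | cons b ne ih =>
    intro v hv
    match v with
    | x :: v =>
      simp only [List.length_cons, List.range_succ_eq_map, List.zip_cons_cons,
        List.filter_cons, List.filter_map]
      simp only [List.length_cons, Nat.add_le_add_iff_right] at hv
      have h2 := ih v hv
      by_cases hb : b = true <;>
        simp [hb, h2, Function.comp_def, List.map_map]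

-- indicator sum = filter length
lemma sum_indicator_eq_filter_length (p : Nat → Bool) (l : List Nat) :
    ((l.map (fun j => if p j then (1 : Int) else 0)).sum) = ((l.filter p).length : Int) := by
  induction l with
  | nil => simp
  | cons x l ih =>
    by_cases h : p x = true <;> simp [h, ih]
    omega

-- one enumerate step of B computes the elementwise minimum of the accumulator and the row
lemma enum_step_min (k : Nat) (acc v : List Int) (hacc : acc.length = k) :
    (PySem.List.enumerate acc).map (fun dm =>
        if PySem.List.pyGetD v dm.1 0 < dm.2 then PySem.List.pyGetD v dm.1 0 else dm.2)
      = (List.range k).map (fun j => min (acc.getD j 0) (v.getD j 0)) := by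
  apply List.ext_getElem
  · simp [PySem.List.length_enumerate, hacc]
  · intro i h1 h2
    simp only [List.getElem_map, List.getElem_range, PySem.List.getElem_enumerate]
    have hik : i < acc.length := by simpa [PySem.List.length_enumerate] using h1
    have : ((0 : Int) + (i : Nat)) = ((i : Nat) : Int) := by omega
    rw [this, PySem.List.pyGetD_natCast, List.getD_eq_getElem acc 0 hik]
    rcases le_or_gt (acc[i]) (v.getD i 0) with h | h
    · rw [min_eq_left h, if_neg (by omega)]
    · rw [min_eq_right (le_of_lt h), if_pos (by omega)]

-- one enumerate step of B computes the elementwise maximum of the accumulator and the row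
lemma enum_step_max (k : Nat) (acc v : List Int) (hacc : acc.length = k) :
    (PySem.List.enumerate acc).map (fun dm =>
        if dm.2 < PySem.List.pyGetD v dm.1 0 then PySem.List.pyGetD v dm.1 0 else dm.2)
      = (List.range k).map (fun j => max (acc.getD j 0) (v.getD j 0)) := by
  apply List.ext_getElem
  · simp [PySem.List.length_enumerate, hacc]
  · intro i h1 h2
    simp only [List.getElem_map, List.getElem_range, PySem.List.getElem_enumerate]
    have hik : i < acc.length := by simpa [PySem.List.length_enumerate] using h1
    have : ((0 : Int) + (i : Nat)) = ((i : Nat) : Int) := by omega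
    rw [this, PySem.List.pyGetD_natCast, List.getD_eq_getElem acc 0 hik]
    rcases le_or_gt (v.getD i 0) (acc[i]) with h | h
    · rw [max_eq_left h, if_neg (by omega)]
    · rw [max_eq_right (le_of_lt h), if_pos (by omega)]

-- B's paired row-major fold computes, per column index, the running min resp. max
lemma fold_enum_min_max (rest : List (List Int)) (k : Nat) :
    ∀ (ms xs : List Int), ms.length = k → xs.length = k →
    rest.foldl (fun (p : List Int × List Int) v =>
        ((PySem.List.enumerate p.1).map (fun dm =>
            if PySem.List.pyGetD v dm.1 0 < dm.2 then PySem.List.pyGetD v dm.1 0 else dm.2),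
         (PySem.List.enumerate p.2).map (fun dm =>
            if dm.2 < PySem.List.pyGetD v dm.1 0 then PySem.List.pyGetD v dm.1 0 else dm.2)))
      (ms, xs)
      = ((List.range k).map (fun j => rest.foldl (fun m v => min m (v.getD j 0)) (ms.getD j 0)),
         (List.range k).map (fun j => rest.foldl (fun m v => max m (v.getD j 0)) (xs.getD j 0))) := by
  induction rest with
  | nil =>
    intro ms xs hms hxs
    simp only [List.foldl_nil]
    refine Prod.ext ?_ ?_
    · apply List.ext_getElem
      · simpa using hms
      · intro i h1 h2
        simp only [List.getElem_map, List.getElem_range]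
        exact (List.getD_eq_getElem ms 0 h1).symm
    · apply List.ext_getElem
      · simpa using hxs
      · intro i h1 h2
        simp only [List.getElem_map, List.getElem_range]
        exact (List.getD_eq_getElem xs 0 h1).symm
  | cons v rest ih =>
    intro ms xs hms hxs
    rw [List.foldl_cons, enum_step_min k ms v hms, enum_step_max k xs v hxs,
      ih _ _ (by simp) (by simp)]
    refine Prod.ext ?_ ?_ <;>
    · dsimp only
      apply List.map_congr_left
      intro j hj
      rw [PySem.List.getD_map_range _ _ _ _ (List.mem_range.mp hj), List.foldl_cons]

-- canonical value of both programs on a nonempty vertex list of width ≥ k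
def pvCanon (v0 : List Int) (rest : List (List Int)) (k : Nat) : List (List Int) × List Int × List Int × Int :=
  let cmin := fun j => rest.foldl (fun m v => min m (v.getD j 0)) (v0.getD j 0)
  let cmax := fun j => rest.foldl (fun m v => max m (v.getD j 0)) (v0.getD j 0)
  let keep := (List.range k).filter (fun j => decide (cmin j ≠ cmax j))
  ((v0 :: rest).map (fun v => keep.map (fun j => v.getD j 0)),
   keep.map cmin, keep.map cmax, (keep.length : Int))

lemma A_eval (v0 : List Int) (rest : List (List Int)) (dimension : Int) (hd : 0 < dimension)
    (hall : ∀ v ∈ v0 :: rest, dimension ≤ (v.length : Int)) :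
    drop_constant_dimensions_py (v0 :: rest) dimension = pvCanon v0 rest dimension.toNat := by
  have hdk : dimension = (dimension.toNat : Int) := (Int.toNat_of_nonneg (le_of_lt hd)).symm
  generalize hkk : dimension.toNat = k at *
  have hlen : ∀ v ∈ v0 :: rest, k ≤ v.length := fun v hv => by have := hall v hv; omega
  have hrange : PySem.List.pyRange 0 dimension 1 = (List.range k).map (fun j : Nat => (j : Int)) := by
    rw [PySem.List.pyRange_one]
    have h2 : (dimension - 0).toNat = k := by omega
    rw [h2]
    exact List.map_congr_left (fun j _ => by omega)
  unfold drop_constant_dimensions_py pvCanon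
  simp only [hrange, List.map_map, Function.comp_def]
  have hmins : (List.range k).map
      (fun j : Nat => (PySem.List.min? ((v0 :: rest).map (fun vertex => PySem.List.pyGetD vertex (j : Int) 0)) (fun y => y)).getD 0)
      = (List.range k).map (fun j => rest.foldl (fun m v => min m (v.getD j 0)) (v0.getD j 0)) := by
    apply List.map_congr_left
    intro j _
    simp only [PySem.List.pyGetD_natCast, List.map_cons, PySem.List.min?_id_cons,
      Option.getD_some, List.foldl_map]
  have hmaxs : (List.range k).map
      (fun j : Nat => (PySem.List.max? ((v0 :: rest).map (fun vertex => PySem.List.pyGetD vertex (j : Int) 0)) (fun y => y)).getD 0)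
      = (List.range k).map (fun j => rest.foldl (fun m v => max m (v.getD j 0)) (v0.getD j 0)) := by
    apply List.map_congr_left
    intro j _
    simp only [PySem.List.pyGetD_natCast, List.map_cons, PySem.List.max?_id_cons,
      Option.getD_some, List.foldl_map]
  rw [hmins, hmaxs]
  have hne : (List.range k).map (fun j : Nat => decide
        (PySem.List.pyGetD ((List.range k).map (fun j => rest.foldl (fun m v => min m (v.getD j 0)) (v0.getD j 0))) (j : Int) 0
       ≠ PySem.List.pyGetD ((List.range k).map (fun j => rest.foldl (fun m v => max m (v.getD j 0)) (v0.getD j 0))) (j : Int) 0))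
      = (List.range k).map (fun j => decide
        (rest.foldl (fun m v => min m (v.getD j 0)) (v0.getD j 0) ≠ rest.foldl (fun m v => max m (v.getD j 0)) (v0.getD j 0))) := by
    apply List.map_congr_left
    intro j hj
    have hjk := List.mem_range.mp hj
    simp only [PySem.List.pyGetD_natCast, PySem.List.getD_map_range _ _ _ _ hjk]
  rw [hne]
  have hkeep : ∀ v : List Int, k ≤ v.length →
      (((v.zip ((List.range k).map (fun j => decide
          (rest.foldl (fun m w => min m (w.getD j 0)) (v0.getD j 0) ≠ rest.foldl (fun m w => max m (w.getD j 0)) (v0.getD j 0))))).filter (fun p => p.2)).map (fun p => p.1))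
      = ((List.range k).filter (fun j => decide
          (rest.foldl (fun m w => min m (w.getD j 0)) (v0.getD j 0) ≠ rest.foldl (fun m w => max m (w.getD j 0)) (v0.getD j 0)))).map (fun j => v.getD j 0) := by
    intro v hv
    rw [zipFilter_eq_indexSel _ v (by simpa using hv)]
    simp only [List.length_map, List.length_range]
    congr 1
    apply List.filter_congr
    intro j hj
    exact PySem.List.getD_map_range _ _ _ _ (List.mem_range.mp hj)
  have hlenM : ((List.range k).map (fun j => rest.foldl (fun m v => min m (v.getD j 0)) (v0.getD j 0))).length = k := by simp
  have hlenX : ((List.range k).map (fun j => rest.foldl (fun m v => max m (v.getD j 0)) (v0.getD j 0))).length = k := by simp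
  refine Prod.ext ?_ (Prod.ext ?_ (Prod.ext ?_ ?_))
  · simp only [pv_dropDims]
    apply List.map_congr_left
    intro v hv
    exact hkeep v (hlen v hv)
  · simp only [pv_dropDims, List.map_cons, List.map_nil, List.getD_cons_zero]
    rw [hkeep _ (le_of_eq hlenM.symm)]
    apply List.map_congr_left
    intro j hj
    exact PySem.List.getD_map_range _ _ _ _ (List.mem_range.mp (List.mem_of_mem_filter hj))
  · simp only [pv_dropDims, List.map_cons, List.map_nil]
    rw [hkeep _ (le_of_eq hlenX.symm)]
    apply List.map_congr_left
    intro j hj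
    exact PySem.List.getD_map_range _ _ _ _ (List.mem_range.mp (List.mem_of_mem_filter hj))
  · dsimp only
    have hsum : (List.range k).map (fun x : Nat => if decide (
          PySem.List.pyGetD ((List.range k).map (fun j => rest.foldl (fun m v => min m (v.getD j 0)) (v0.getD j 0))) (x : Int) 0
        ≠ PySem.List.pyGetD ((List.range k).map (fun j => rest.foldl (fun m v => max m (v.getD j 0)) (v0.getD j 0))) (x : Int) 0)
        then (1 : Int) else 0)
        = (List.range k).map (fun j : Nat => if decide (
          rest.foldl (fun m v => min m (v.getD j 0)) (v0.getD j 0) ≠ rest.foldl (fun m v => max m (v.getD j 0)) (v0.getD j 0))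
        then (1 : Int) else 0) := by
      apply List.map_congr_left
      intro j hj
      have hjk := List.mem_range.mp hj
      simp only [PySem.List.pyGetD_natCast, PySem.List.getD_map_range _ _ _ _ hjk]
    rw [hsum]
    exact sum_indicator_eq_filter_length _ _

lemma B_eval (v0 : List Int) (rest : List (List Int)) (dimension : Int) (hd : 0 < dimension)
    (hall : ∀ v ∈ v0 :: rest, dimension ≤ (v.length : Int)) :
    drop_constant_dimensions_py_alt (v0 :: rest) dimension = pvCanon v0 rest dimension.toNat := by
  have hdk : dimension = (dimension.toNat : Int) := (Int.toNat_of_nonneg (le_of_lt hd)).symm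
  generalize hkk : dimension.toNat = k at *
  have hlen : ∀ v ∈ v0 :: rest, k ≤ v.length := fun v hv => by have := hall v hv; omega
  have hrange : PySem.List.pyRange 0 dimension 1 = (List.range k).map (fun j : Nat => (j : Int)) := by
    rw [PySem.List.pyRange_one]
    have h2 : (dimension - 0).toNat = k := by omega
    rw [h2]
    exact List.map_congr_left (fun j _ => by omega)
  unfold drop_constant_dimensions_py_alt pvCanon
  simp only [hrange, PySem.List.slice_from_one, List.tail_cons, List.getD_cons_zero]
  have hmins0 : ((List.range k).map (fun j : Nat => (j : Int))).foldl
      (fun acc d => acc ++ [PySem.List.pyGetD v0 d 0]) []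
      = (List.range k).map (fun j => v0.getD j 0) := by
    rw [PySem.List.foldl_append_singleton_eq_map]
    simp only [List.nil_append, List.map_map, Function.comp_def, PySem.List.pyGetD_natCast]
  rw [hmins0, fold_enum_min_max rest k _ _ (by simp) (by simp)]
  have hcol : ∀ (f : Int → Int → Int),
      (List.range k).map (fun j => rest.foldl (fun m v => f m (v.getD j 0))
        (((List.range k).map (fun j => v0.getD j 0)).getD j 0))
      = (List.range k).map (fun j => rest.foldl (fun m v => f m (v.getD j 0)) (v0.getD j 0)) := by
    intro f
    apply List.map_congr_left
    intro j hj
    rw [PySem.List.getD_map_range _ _ _ _ (List.mem_range.mp hj)]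
  rw [hcol, hcol]
  have hfil : ((List.range k).map (fun j : Nat => (j : Int))).filter (fun d =>
        decide (PySem.List.pyGetD ((List.range k).map (fun j => rest.foldl (fun m v => min m (v.getD j 0)) (v0.getD j 0))) d 0
              ≠ PySem.List.pyGetD ((List.range k).map (fun j => rest.foldl (fun m v => max m (v.getD j 0)) (v0.getD j 0))) d 0))
      = ((List.range k).filter (fun j => decide
          (rest.foldl (fun m v => min m (v.getD j 0)) (v0.getD j 0) ≠ rest.foldl (fun m v => max m (v.getD j 0)) (v0.getD j 0)))).map (fun j : Nat => (j : Int)) := by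
    rw [List.filter_map]
    congr 1
    apply List.filter_congr
    intro j hj
    have hjk := List.mem_range.mp hj
    simp only [Function.comp_def, PySem.List.pyGetD_natCast, PySem.List.getD_map_range _ _ _ _ hjk]
  rw [hfil]
  refine Prod.ext ?_ (Prod.ext ?_ (Prod.ext ?_ ?_))
  · dsimp only
    apply List.map_congr_left
    intro v _
    rw [List.map_map]
    exact List.map_congr_left (fun j _ => by simp [PySem.List.pyGetD_natCast])
  · dsimp only
    rw [List.map_map]
    apply List.map_congr_left
    intro j hj
    simp only [Function.comp_def, PySem.List.pyGetD_natCast]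
    exact PySem.List.getD_map_range _ _ _ _ (List.mem_range.mp (List.mem_of_mem_filter hj))
  · dsimp only
    rw [List.map_map]
    apply List.map_congr_left
    intro j hj
    simp only [Function.comp_def, PySem.List.pyGetD_natCast]
    exact PySem.List.getD_map_range _ _ _ _ (List.mem_range.mp (List.mem_of_mem_filter hj))
  · simp

-- ===== VERDICT =====
theorem drop_constant_dimensions_py_spec : Claim_equal_drop_constant_dimensions_py := by
  intro vertices dimension _ hpre
  unfold Spec_drop_constant_dimensions_py
  by_cases hd : 0 < dimension
  · obtain ⟨hne, hall⟩ := hpre hd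
    match vertices, hne with
    | v0 :: rest, _ =>
      rw [A_eval v0 rest dimension hd hall, B_eval v0 rest dimension hd hall]
  · have hr : PySem.List.pyRange 0 dimension 1 = [] := PySem.List.pyRange_one_eq_nil (by omega)
    cases vertices with
    | nil => simp [drop_constant_dimensions_py, drop_constant_dimensions_py_alt, pv_dropDims, hr]
    | cons v0 rest =>
      simp [drop_constant_dimensions_py, drop_constant_dimensions_py_alt, pv_dropDims, hr,
        PySem.List.slice_from_one, fold_enum_min_max rest 0 [] [] rfl rfl]
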